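-- pv_equiv track=rewrite | github.com/djtiedemann/riddles | lottery-/lotterySolver.py | getAllPossibleSelectionsOfLength5
-- ===== SOURCE A (Python) =====
-- def getAllPossibleSelectionsOfLength5(potentialValues):
-- 	possibleSelections = []
-- 	for val1 in range(0, len(potentialValues)):
-- 		for val2 in range(val1+1, len(potentialValues)):
-- 			for val3 in range(val2+1, len(potentialValues)):
-- 				for val4 in range(val3+1, len(potentialValues)):
-- 					for val5 in range(val4+1, len(potentialValues)):
-- 						possibleSelections.append([potentialValues[val1], potentialValues[val2], potentialValues[val3], potentialValues[val4], potentialValues[val5]])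
-- 	return possibleSelections
-- ===== SOURCE B (Python) =====
-- def getAllPossibleSelectionsOfLength5(potentialValues):
--     def combos(n, xs):
--         if n == 0:
--             return [[]]
--         if not xs:
--             return []
--         head, rest = xs[0], xs[1:]
--         return [[head] + t for t in combos(n - 1, rest)] + combos(n, rest)
--     return combos(5, potentialValues)
-- ===== Notes on version B (the rewrite author's own statement) =====
-- stated objective: alternative
-- what changed: Replaced the five hard-coded nested index loops with a structural recursion combos(n, xs) that either takes the head element or skips it, concatenating head-taken combinations before head-skipped ones to preserve the index-lexicographic order.
import Mathlib
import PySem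

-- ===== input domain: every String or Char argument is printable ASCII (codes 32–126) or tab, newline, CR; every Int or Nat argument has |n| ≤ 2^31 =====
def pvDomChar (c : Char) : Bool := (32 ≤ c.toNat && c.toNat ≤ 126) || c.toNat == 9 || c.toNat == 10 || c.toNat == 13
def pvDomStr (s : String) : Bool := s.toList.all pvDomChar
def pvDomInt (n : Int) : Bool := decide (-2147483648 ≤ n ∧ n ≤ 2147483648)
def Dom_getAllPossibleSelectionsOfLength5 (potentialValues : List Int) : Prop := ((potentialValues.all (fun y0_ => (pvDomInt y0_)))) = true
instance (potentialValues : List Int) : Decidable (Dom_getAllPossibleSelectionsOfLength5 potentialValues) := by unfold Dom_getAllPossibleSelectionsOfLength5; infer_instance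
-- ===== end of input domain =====

-- B replaces the five hard-coded nested index loops by a take-head-or-skip-head
-- structural recursion (alternative decomposition, same cost).

-- ===== PORT A =====
def getAllPossibleSelectionsOfLength5 (potentialValues : List Int) : List (List Int) :=
  (PySem.List.pyRange 0 (potentialValues.length : Int) 1).foldl (fun acc1 val1 =>
    (PySem.List.pyRange (val1 + 1) (potentialValues.length : Int) 1).foldl (fun acc2 val2 =>
      (PySem.List.pyRange (val2 + 1) (potentialValues.length : Int) 1).foldl (fun acc3 val3 =>
        (PySem.List.pyRange (val3 + 1) (potentialValues.length : Int) 1).foldl (fun acc4 val4 =>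
          (PySem.List.pyRange (val4 + 1) (potentialValues.length : Int) 1).foldl (fun acc5 val5 =>
            acc5 ++ [[PySem.List.pyGetD potentialValues val1 0,
                      PySem.List.pyGetD potentialValues val2 0,
                      PySem.List.pyGetD potentialValues val3 0,
                      PySem.List.pyGetD potentialValues val4 0,
                      PySem.List.pyGetD potentialValues val5 0]]) acc4) acc3) acc2) acc1) []

-- ===== PORT B =====
-- combos(n, xs): take the head (cons onto each combination of n-1 from the tail)
-- or skip the head, in that order.
def pvCombos : Nat → List Int → List (List Int)
  | 0, _ => [[]]
  | _ + 1, [] => []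
  | n + 1, x :: rest => (pvCombos n rest).map (fun t => x :: t) ++ pvCombos (n + 1) rest

def getAllPossibleSelectionsOfLength5_alt (potentialValues : List Int) : List (List Int) :=
  pvCombos 5 potentialValues

-- ===== PRECONDITION & SPEC =====
def Spec_getAllPossibleSelectionsOfLength5 (potentialValues : List Int) (out : List (List Int)) : Prop := out = getAllPossibleSelectionsOfLength5_alt potentialValues
instance (potentialValues : List Int) (out : List (List Int)) : Decidable (Spec_getAllPossibleSelectionsOfLength5 potentialValues out) := by unfold Spec_getAllPossibleSelectionsOfLength5; infer_instance

-- ===== CLAIM (what is proved, stated in full; the proofs are below) =====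
def Claim_equal_getAllPossibleSelectionsOfLength5 : Prop := ∀ (potentialValues : List Int), Dom_getAllPossibleSelectionsOfLength5 potentialValues → Spec_getAllPossibleSelectionsOfLength5 potentialValues (getAllPossibleSelectionsOfLength5 potentialValues)

-- ===== LEMMAS AND PROOFS =====

/-- Proof-side uniform version of A's nested loops: pick `k` further indices
starting from `i`, as nested flatMaps with a cons-map around each level. -/
def pvSel (pv : List Int) : Nat → Int → List (List Int)
  | 0, _ => [[]]
  | k + 1, i =>
    (PySem.List.pyRange i (pv.length : Int) 1).flatMap
      (fun j => (pvSel pv k (j + 1)).map (fun t => PySem.List.pyGetD pv j 0 :: t))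

lemma pvSel_eq_combos (pv : List Int) :
    ∀ (k : Nat) (i : Int), 0 ≤ i → pvSel pv k i = pvCombos k (pv.drop i.toNat) := by
  intro k
  induction k with
  | zero =>
    intro i _
    cases h : pv.drop i.toNat <;> simp [pvSel, pvCombos]
  | succ k ihk =>
    -- downward induction on (pv.length - i.toNat)
    suffices h : ∀ (d : Nat) (i : Int), 0 ≤ i → pv.length - i.toNat ≤ d →
        pvSel pv (k + 1) i = pvCombos (k + 1) (pv.drop i.toNat) by
      intro i hi; exact h (pv.length - i.toNat) i hi le_rfl
    intro d
    induction d with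
    | zero =>
      intro i hi hd
      have hlen : pv.length ≤ i.toNat := by omega
      have hdrop : pv.drop i.toNat = [] := List.drop_eq_nil_of_le hlen
      have hnil : PySem.List.pyRange i (pv.length : Int) 1 = [] := by
        apply PySem.List.pyRange_one_eq_nil
        omega
      simp [pvSel, hnil, hdrop, pvCombos]
    | succ d ihd =>
      intro i hi hd
      by_cases hlt : i.toNat < pv.length
      · have hiL : i < (pv.length : Int) := by omega
        have hcons : PySem.List.pyRange i (pv.length : Int) 1
            = i :: PySem.List.pyRange (i + 1) (pv.length : Int) 1 :=
          PySem.List.pyRange_one_cons hiL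
        have hget : PySem.List.pyGetD pv i 0 = pv[i.toNat] :=
          PySem.List.pyGetD_eq_getElem pv 0 hi (by omega)
        have hdrop : pv.drop i.toNat = pv[i.toNat] :: pv.drop (i.toNat + 1) :=
          List.drop_eq_getElem_cons hlt
        have hnext : (i + 1).toNat = i.toNat + 1 := by omega
        have h1 : pvSel pv k (i + 1) = pvCombos k (pv.drop (i.toNat + 1)) := by
          rw [ihk (i + 1) (by omega), hnext]
        have h2 : pvSel pv (k + 1) (i + 1) = pvCombos (k + 1) (pv.drop (i.toNat + 1)) := by
          rw [ihd (i + 1) (by omega) (by omega), hnext]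
        calc pvSel pv (k + 1) i
            = (pvSel pv k (i + 1)).map (fun t => PySem.List.pyGetD pv i 0 :: t)
                ++ pvSel pv (k + 1) (i + 1) := by
              simp [pvSel, hcons]
          _ = pvCombos (k + 1) (pv.drop i.toNat) := by
              rw [h1, h2, hget, hdrop]
              rfl
      · have hdrop : pv.drop i.toNat = [] := List.drop_eq_nil_of_le (by omega)
        have hnil : PySem.List.pyRange i (pv.length : Int) 1 = [] := by
          apply PySem.List.pyRange_one_eq_nil
          omega
        simp [pvSel, hnil, hdrop, pvCombos]

/-- A's nested append-folds equal the uniform nested-flatMap form at depth 5. -/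
lemma portA_eq_pvSel (pv : List Int) :
    getAllPossibleSelectionsOfLength5 pv = pvSel pv 5 0 := by
  unfold getAllPossibleSelectionsOfLength5
  simp only [PySem.List.foldl_append_eq_flatMap]
  simp [pvSel, List.map_flatMap]

-- ===== VERDICT (by name: the statement is the Claim_ definition above) =====
theorem getAllPossibleSelectionsOfLength5_spec : Claim_equal_getAllPossibleSelectionsOfLength5 := by
  intro pv _
  show getAllPossibleSelectionsOfLength5 pv = getAllPossibleSelectionsOfLength5_alt pv
  rw [portA_eq_pvSel, pvSel_eq_combos pv 5 0 le_rfl]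
  rfl
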